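-- pv_equiv track=rewrite | github.com/edharcourt/CS140 | python/miniMaxSum.py | miniMaxSum
-- ===== SOURCE A (Python) =====
-- def miniMaxSum(arr):
--     minimum = arr[0]
--     maximum = arr[0]
--     total = 0
--
--     for x in arr:
--         total += x
--         if x < minimum:
--             minimum = x
--         if x > maximum:
--             maximum = x
--
--
--     return (total - maximum, total - minimum)
-- ===== SOURCE B (Python) =====
-- def miniMaxSum(arr):
--     s = sorted(arr)
--     total = sum(arr)
--     return (total - s[-1], total - s[0])
-- ===== Notes on version B (the rewrite author's own statement) =====
-- stated objective: idiomatic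
-- what changed: Replaces the manual single-pass loop tracking running min/max/total with sorted(arr) + sum(arr), reading the extremes off the ends of the sorted list.
-- outside the precondition, e.g. on miniMaxSum([]): A raises IndexError, B raises IndexError
import Mathlib
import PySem

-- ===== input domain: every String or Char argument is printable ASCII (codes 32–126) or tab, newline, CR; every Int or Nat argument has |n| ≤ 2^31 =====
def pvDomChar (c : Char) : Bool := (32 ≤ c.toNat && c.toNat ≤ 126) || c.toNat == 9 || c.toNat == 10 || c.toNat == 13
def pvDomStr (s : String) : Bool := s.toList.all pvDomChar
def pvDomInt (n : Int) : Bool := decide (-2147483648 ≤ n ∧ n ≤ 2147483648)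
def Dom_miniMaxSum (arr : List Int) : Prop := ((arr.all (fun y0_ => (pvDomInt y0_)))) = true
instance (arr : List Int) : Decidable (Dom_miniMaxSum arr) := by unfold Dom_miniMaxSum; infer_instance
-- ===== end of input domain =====

-- B replaces A's manual running-min/max/total loop by sorted(arr) + sum(arr), reading the extremes off the sorted list's ends.


-- ===== PORT A =====
def miniMaxSum (arr : List Int) : Int × Int :=
  -- minimum = arr[0]; maximum = arr[0]  (IndexError on the empty list: excluded by Pre_)
  let a0 := PySem.List.pyGetD arr 0 0
  -- for x in arr: total += x; if x < minimum: …; if x > maximum: …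
  let st := arr.foldl
    (fun (s : Int × Int × Int) x =>
      let minimum := s.1
      let maximum := s.2.1
      let total := s.2.2
      let total := total + x
      let minimum := if x < minimum then x else minimum
      let maximum := if x > maximum then x else maximum
      (minimum, maximum, total))
    (a0, a0, 0)
  (st.2.2 - st.2.1, st.2.2 - st.1)

-- ===== PORT B =====
def miniMaxSum_alt (arr : List Int) : Int × Int :=
  let s := PySem.List.sorted arr (fun x => x) false
  let total := arr.sum
  -- s[-1] / s[0]: IndexError on the empty list, excluded by Pre_
  (total - PySem.List.pyGetD s (-1) 0, total - PySem.List.pyGetD s 0 0)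

-- ===== PRECONDITION & SPEC =====
-- Pre_ excludes only the empty list, on which both Pythons raise IndexError (A at arr[0], B at s[-1]).
def Pre_miniMaxSum (arr : List Int) : Prop := arr ≠ []
instance (arr : List Int) : Decidable (Pre_miniMaxSum arr) := by unfold Pre_miniMaxSum; infer_instance
def pvWitness_miniMaxSum : List Int := [2, -1, 7]

def Spec_miniMaxSum (arr : List Int) (out : Int × Int) : Prop := out = miniMaxSum_alt arr
instance (arr : List Int) (out : Int × Int) : Decidable (Spec_miniMaxSum arr out) := by unfold Spec_miniMaxSum; infer_instance

-- ===== CLAIM (what is proved, stated in full; the proofs are below) =====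
def Claim_equal_miniMaxSum : Prop := ∀ (arr : List Int), Dom_miniMaxSum arr → Pre_miniMaxSum arr → Spec_miniMaxSum arr (miniMaxSum arr)

-- ===== LEMMAS AND PROOFS =====

-- A's loop computes (running min, running max, running sum).
theorem pvLoopA (t : List Int) (mn mx tot : Int) :
    t.foldl
      (fun (s : Int × Int × Int) x =>
        let minimum := s.1
        let maximum := s.2.1
        let total := s.2.2
        let total := total + x
        let minimum := if x < minimum then x else minimum
        let maximum := if x > maximum then x else maximum
        (minimum, maximum, total))
      (mn, mx, tot)
    = (t.foldl min mn, t.foldl max mx, tot + t.sum) := by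
  induction t generalizing mn mx tot with
  | nil => simp
  | cons x t ih =>
    have e1 : (if x < mn then x else mn) = min mn x := by
      rw [min_def]; split_ifs <;> omega
    have e2 : (if x > mx then x else mx) = max mx x := by
      rw [max_def]; split_ifs <;> omega
    simp only [List.foldl_cons, List.sum_cons]
    rw [ih, e1, e2, add_assoc]

theorem miniMaxSum_spec_aux (h : Int) (t : List Int) :
    miniMaxSum (h :: t) = miniMaxSum_alt (h :: t) := by
  -- A's side: first iteration turns (h, h, 0) into (h, h, h), then pvLoopA
  have hA : miniMaxSum (h :: t) =
      ((h + t.sum) - t.foldl max h, (h + t.sum) - t.foldl min h) := by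
    simp only [miniMaxSum, PySem.List.pyGetD_zero_cons, List.foldl_cons]
    simp only [lt_self_iff_false, if_false, gt_iff_lt, zero_add, pvLoopA]
  -- facts about the fold extremes
  obtain ⟨hmn_mem, hmn_le⟩ :
      t.foldl min h ∈ h :: t ∧ ∀ b ∈ h :: t, t.foldl min h ≤ b :=
    List.min?_eq_some_iff.mp rfl
  obtain ⟨hmx_mem, hmx_ge⟩ :
      t.foldl max h ∈ h :: t ∧ ∀ b ∈ h :: t, b ≤ t.foldl max h :=
    List.max?_eq_some_iff.mp rfl
  -- B's side: the sorted list is nonempty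
  set s := PySem.List.sorted (h :: t) (fun x => x) false with hs
  have hsne : s ≠ [] := by
    rw [hs, Ne, PySem.List.sorted_eq_nil_iff]; simp
  obtain ⟨m0, rest, hcons⟩ := List.exists_cons_of_ne_nil hsne
  have hmem_s : ∀ y, y ∈ s ↔ y ∈ h :: t := fun y =>
    PySem.List.mem_sorted (h :: t) (fun x => x) false y
  have hc2 : PySem.List.sorted (h :: t) (fun x => x) false = m0 :: rest :=
    hs.symm.trans hcons
  -- head of sorted = fold min
  have hhead : m0 = t.foldl min h := by
    have h1 : m0 ≤ t.foldl min h :=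
      PySem.List.key_head_sorted_le (h :: t) (fun x => x) hc2 (List.foldl min h t) hmn_mem
    have h2 : t.foldl min h ≤ m0 := by
      apply hmn_le
      rw [← hmem_s m0, hcons]; exact List.mem_cons_self
    omega
  -- last of sorted = fold max
  have hlast : s.getLast hsne = t.foldl max h := by
    have h1 : t.foldl max h ≤ s.getLast hsne := by
      have hm : t.foldl max h ∈ s := (hmem_s _).mpr hmx_mem
      obtain ⟨p, hp, hpe⟩ := List.mem_iff_getElem.mp hm
      have hlen : 0 < s.length := List.length_pos_iff.mpr hsne
      have hsl : (PySem.List.sorted (h :: t) (fun x => x) false).length = s.length := by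
        rw [hs]
      have hmono := PySem.List.key_sorted_getElem_mono (xs := h :: t) (key := fun x => x)
        (p := p) (q := s.length - 1) (by omega) (by omega)
      rw [List.getLast_eq_getElem, ← hpe]
      simpa [hs] using hmono
    have h2 : s.getLast hsne ≤ t.foldl max h := by
      apply hmx_ge
      rw [← hmem_s]; exact List.getLast_mem hsne
    omega
  -- assemble
  rw [hA]
  simp only [miniMaxSum_alt, ← hs, List.sum_cons]
  rw [PySem.List.pyGetD_neg_one (h := hsne), hlast, hcons,
      PySem.List.pyGetD_zero_cons, hhead]

-- ===== VERDICT (by name: the statement is the Claim_ definition above) =====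
theorem miniMaxSum_spec : Claim_equal_miniMaxSum := by
  intro arr _ hpre
  unfold Spec_miniMaxSum
  cases arr with
  | nil => exact absurd rfl hpre
  | cons h t => exact miniMaxSum_spec_aux h t
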